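-- pv_equiv track=rewrite | github.com/psh960831/coding_by_python | mon_37.py | solution
-- ===== SOURCE A (Python) =====
-- def solution(answers):
--     answer = []
--     case_1 = [1,2,3,4,5]
--     case_2 = [2,1,2,3,2,4,2,5]
--     case_3 = [3,3,1,1,2,2,4,4,5,5]
--     score = [0] * 3
--     for i in range(len(answers)) :
--         if answers[i] == case_1[i%5]:
--             score[0] += 1
--         if answers[i] == case_2[i%8]:
--             score[1] += 1
--         if answers[i] == case_3[i%10]:
--             score[2] += 1
--     tem = max(score)
--     for i in range(len(score)):
--         if tem == score[i] :
--             answer.append(i+1)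
--     return answer
-- ===== SOURCE B (Python) =====
-- def _score(answers, pattern):
--     # count matches against the pattern repeated cyclically, one pattern per pass
--     score = 0
--     rest = pattern
--     for a in answers:
--         if not rest:
--             rest = pattern
--         score += (a == rest[0])
--         rest = rest[1:]
--     return score
--
-- def solution(answers):
--     patterns = [[1, 2, 3, 4, 5],
--                 [2, 1, 2, 3, 2, 4, 2, 5],
--                 [3, 3, 1, 1, 2, 2, 4, 4, 5, 5]]
--     scores = [_score(answers, p) for p in patterns]
--     best = max(scores)
--     return [i + 1 for i, s in enumerate(scores) if s == best]
-- ===== Notes on version B (the rewrite author's own statement) =====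
-- stated objective: alternative
-- what changed: A makes one combined pass checking all three supervisors per index via i%len indexing; B scores each supervisor in its own pass by walking a shrinking remainder of the pattern (reset when exhausted), then picks the maxima from the score list.
import Mathlib
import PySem

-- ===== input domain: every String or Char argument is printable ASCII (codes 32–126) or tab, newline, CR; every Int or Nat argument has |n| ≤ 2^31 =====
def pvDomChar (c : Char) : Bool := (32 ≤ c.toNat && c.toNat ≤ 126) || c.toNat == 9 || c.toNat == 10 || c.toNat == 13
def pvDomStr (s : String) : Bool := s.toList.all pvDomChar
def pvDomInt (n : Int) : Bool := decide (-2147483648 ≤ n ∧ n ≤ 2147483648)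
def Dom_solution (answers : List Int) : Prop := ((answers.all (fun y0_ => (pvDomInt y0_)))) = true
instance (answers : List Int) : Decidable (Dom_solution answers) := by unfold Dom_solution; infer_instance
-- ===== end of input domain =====

-- B changes the decomposition (one pass per supervisor, cycling via a shrinking pattern remainder,
-- then a max/filter over the score list) instead of A's single combined three-check pass; same cost.

-- ===== PORT A =====
-- loop body of A's single combined scoring pass (answers[i] is always in range here, so getD is exact)
def stepA (answers : List Int) (s : Int × Int × Int) (i : Nat) : Int × Int × Int :=
  let a := answers.getD i 0
  let s0 := if a = ([1,2,3,4,5] : List Int).getD (i % 5) 0 then s.1 + 1 else s.1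
  let s1 := if a = ([2,1,2,3,2,4,2,5] : List Int).getD (i % 8) 0 then s.2.1 + 1 else s.2.1
  let s2 := if a = ([3,3,1,1,2,2,4,4,5,5] : List Int).getD (i % 10) 0 then s.2.2 + 1 else s.2.2
  (s0, s1, s2)

def solution (answers : List Int) : List Int :=
  let score := (List.range answers.length).foldl (stepA answers) (0, 0, 0)
  let scoreL : List Int := [score.1, score.2.1, score.2.2]
  let tem := (PySem.List.max? scoreL (fun y => y)).getD 0   -- scoreL is nonempty: max(score)
  (List.range scoreL.length).foldl
    (fun (acc : List Int) i => if tem = scoreL.getD i 0 then acc ++ [(i : Int) + 1] else acc) []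

-- ===== PORT B =====
-- Source B's _score: walk answers, consuming a remainder of the pattern, resetting it when exhausted
def cycScore (pattern : List Int) : List Int → List Int → Int → Int
  | [], _, score => score
  | a :: tl, rest, score =>
    let r := if rest.isEmpty then pattern else rest
    cycScore pattern tl r.tail (score + if a = r.headD 0 then 1 else 0)

def solution_alt (answers : List Int) : List Int :=
  let patterns : List (List Int) :=
    [[1,2,3,4,5], [2,1,2,3,2,4,2,5], [3,3,1,1,2,2,4,4,5,5]]
  let scores := patterns.map (fun p => cycScore p answers p 0)
  let best := (PySem.List.max? scores (fun y => y)).getD 0    -- scores is nonempty: max(scores)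
  (PySem.List.enumerate scores 0).foldl
    (fun (acc : List Int) (q : Int × Int) => if q.2 = best then acc ++ [q.1 + 1] else acc) []

-- ===== PRECONDITION & SPEC =====
def Spec_solution (answers : List Int) (out : List Int) : Prop := out = solution_alt answers
instance (answers : List Int) (out : List Int) : Decidable (Spec_solution answers out) := by unfold Spec_solution; infer_instance

-- ===== CLAIM (what is proved, stated in full; the proofs are below) =====
def Claim_equal_solution : Prop := ∀ (answers : List Int), Dom_solution answers → Spec_solution answers (solution answers)

-- ===== LEMMAS AND PROOFS =====

-- reference count: matches of ans against pattern p cycled, starting at offset j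
def cnt (p : List Int) : List Int → Nat → Int
  | [], _ => 0
  | a :: tl, j => (if a = p.getD (j % p.length) 0 then 1 else 0) + cnt p tl (j + 1)

lemma mod_succ_mod (j L : Nat) : (j + 1) % L = (j % L + 1) % L := by
  have h := Nat.mod_add_div j L
  have : j + 1 = (j % L + 1) + L * (j / L) := by omega
  rw [this, Nat.add_mul_mod_self_left]

lemma cnt_mod (p : List Int) (ans : List Int) (j : Nat) :
    cnt p ans j = cnt p ans (j % p.length) := by
  induction ans generalizing j with
  | nil => rfl
  | cons a tl ih =>
    simp only [cnt]
    rw [ih (j + 1), ih (j % p.length + 1), Nat.mod_mod_of_dvd j dvd_rfl,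
      mod_succ_mod j p.length]

lemma cycScore_reset (p : List Int) (hp : p ≠ []) (tl : List Int) (acc : Int) :
    cycScore p tl [] acc = cycScore p tl p acc := by
  have hpe : p.isEmpty = false := by simp [hp]
  cases tl with
  | nil => rfl
  | cons b bs => simp [cycScore, hpe]

lemma cyc_eq (p : List Int) (hp : p ≠ []) (ans : List Int) (j : Nat) (hj : j < p.length)
    (acc : Int) : cycScore p ans (p.drop j) acc = acc + cnt p ans j := by
  induction ans generalizing j acc with
  | nil => simp [cycScore, cnt]
  | cons a tl ih =>
    have hne : (p.drop j).isEmpty = false := by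
      simp [List.drop_eq_nil_iff]; omega
    have hhead : (p.drop j).headD 0 = p.getD (j % p.length) 0 := by
      rw [Nat.mod_eq_of_lt hj]
      simp [List.headD_eq_head?_getD, List.head?_drop, List.getD_eq_getElem?_getD]
    have htail : (p.drop j).tail = p.drop (j + 1) := by
      rw [List.tail_drop]
    simp only [cycScore, hne, Bool.false_eq_true, if_false, htail, hhead, cnt]
    by_cases hlt : j + 1 < p.length
    · rw [ih (j + 1) hlt]; ring
    · have hj1 : j + 1 = p.length := by omega
      have h0 : (0 : Nat) < p.length := by omega
      rw [hj1, List.drop_length, cycScore_reset p hp]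
      have : cycScore p tl p (acc + if a = p.getD (j % p.length) 0 then 1 else 0)
          = cycScore p tl (p.drop 0)
              (acc + if a = p.getD (j % p.length) 0 then 1 else 0) := by
        rw [List.drop_zero]
      rw [this, ih 0 h0, cnt_mod p tl p.length, Nat.mod_self]
      ring

-- A-side: the combined fold over indices scores all three patterns at once
lemma foldA_eq (full : List Int) (ans : List Int) (j : Nat)
    (hsuffix : full.drop j = ans) (s : Int × Int × Int) :
    (List.range' j ans.length).foldl (stepA full) s =
      (s.1 + cnt [1,2,3,4,5] ans j, s.2.1 + cnt [2,1,2,3,2,4,2,5] ans j,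
       s.2.2 + cnt [3,3,1,1,2,2,4,4,5,5] ans j) := by
  induction ans generalizing j s with
  | nil => simp [cnt]
  | cons a tl ih =>
    have hget : full.getD j 0 = a := by
      have h1 : (full.drop j).head? = some a := by rw [hsuffix]; rfl
      rw [List.head?_drop] at h1
      simp [List.getD_eq_getElem?_getD, h1]
    have htl : full.drop (j + 1) = tl := by
      have := congrArg List.tail hsuffix
      rwa [List.tail_drop] at this
    simp only [List.length_cons, List.range'_succ, List.foldl_cons]
    rw [ih (j + 1) htl]
    simp only [cnt, stepA, hget]
    refine Prod.ext ?_ (Prod.ext ?_ ?_)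
    all_goals simp only []
    · show _ = s.1 + _
      split_ifs with h <;> simp_all <;> ring
    · show _ = s.2.1 + _
      split_ifs with h <;> simp_all <;> ring
    · show _ = s.2.2 + _
      split_ifs with h <;> simp_all <;> ring

-- once the three scores agree, A's range-indexed filter and B's enumerate filter coincide
lemma final_eq (t x y z : Int) :
    (List.range ([x, y, z] : List Int).length).foldl
      (fun (acc : List Int) i => if t = ([x, y, z] : List Int).getD i 0 then acc ++ [(i : Int) + 1] else acc) []
    = (PySem.List.enumerate ([x, y, z] : List Int) 0).foldl
      (fun (acc : List Int) (q : Int × Int) => if q.2 = t then acc ++ [q.1 + 1] else acc) [] := by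
  have hr : List.range ([x, y, z] : List Int).length = [0, 1, 2] := rfl
  have he : PySem.List.enumerate ([x, y, z] : List Int) 0 = [(0, x), (1, y), (2, z)] := by
    simp [PySem.List.enumerate_cons, PySem.List.enumerate_nil]
  rw [hr, he]
  simp only [List.foldl_cons, List.foldl_nil]
  norm_num
  by_cases h1 : t = x <;> by_cases h2 : t = y <;> by_cases h3 : t = z <;>
    simp [h1, h2, h3, eq_comm]

-- ===== VERDICT (by name: the statement is the Claim_ definition above) =====
theorem solution_spec : Claim_equal_solution := by
  intro answers _
  unfold Spec_solution solution solution_alt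
  have hA : (List.range answers.length).foldl (stepA answers) (0, 0, 0) =
      (cnt [1,2,3,4,5] answers 0, cnt [2,1,2,3,2,4,2,5] answers 0,
       cnt [3,3,1,1,2,2,4,4,5,5] answers 0) := by
    rw [List.range_eq_range']
    rw [foldA_eq answers answers 0 (by rw [List.drop_zero]) (0, 0, 0)]
    simp only [zero_add]
  have hB : ∀ (p : List Int), p ≠ [] → cycScore p answers p 0 = cnt p answers 0 := by
    intro p hp
    have := cyc_eq p hp answers 0 (by cases p with
      | nil => exact absurd rfl hp
      | cons b bs => simp) 0
    rw [List.drop_zero] at this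
    rw [this, zero_add]
  simp only [hA, List.map_cons, List.map_nil,
    hB [1,2,3,4,5] (by simp), hB [2,1,2,3,2,4,2,5] (by simp),
    hB [3,3,1,1,2,2,4,4,5,5] (by simp)]
  exact final_eq _ _ _ _
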